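-- pv_equiv track=rewrite | github.com/michalskit/efektywny-python-lab-2 | lab2_3.py | count_words_starting_with_given_letter
-- ===== SOURCE A (Python) =====
-- def count_words_starting_with_given_letter(text, letter):
--     """Zwraca słownik gdzie kluczami są wszystkie słowa występujące w tekście
--     rozpoczynające się na zadaną literę, a wartością ile razy wystąpiy"""
--     result = {}
--     for word in text.split():
--         if word[0] == letter:
--             if word not in result:
--                 result[word] = 1
--             else:
--                 result[word] += 1
--     return result
-- ===== SOURCE B (Python) =====
-- def count_words_starting_with_given_letter(text, letter):
--     """Zwraca słownik gdzie kluczami są wszystkie słowa występujące w tekście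
--     rozpoczynające się na zadaną literę, a wartością ile razy wystąpiy"""
--     matches = [w for w in text.split() if w[0] == letter]
--     return {w: matches.count(w) for w in dict.fromkeys(matches)}
-- ===== Notes on version B (the rewrite author's own statement) =====
-- stated objective: alternative
-- what changed: Replaces A's accumulate-counts-in-a-dict-while-scanning loop with a two-phase pipeline: build the filtered word list once, then map each first-occurrence-deduped word to its count in that list.
import Mathlib
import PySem

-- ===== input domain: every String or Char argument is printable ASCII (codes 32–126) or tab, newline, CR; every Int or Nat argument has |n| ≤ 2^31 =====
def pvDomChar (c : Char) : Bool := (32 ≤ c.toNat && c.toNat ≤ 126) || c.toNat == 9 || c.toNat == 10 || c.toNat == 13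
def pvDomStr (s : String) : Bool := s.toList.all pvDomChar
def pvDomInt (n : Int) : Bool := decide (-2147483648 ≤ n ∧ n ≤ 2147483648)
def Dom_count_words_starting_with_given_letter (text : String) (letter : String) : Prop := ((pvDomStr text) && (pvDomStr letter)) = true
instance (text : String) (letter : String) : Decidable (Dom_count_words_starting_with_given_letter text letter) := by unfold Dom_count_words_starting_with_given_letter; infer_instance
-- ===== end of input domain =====

-- B builds the filtered word list once, then maps first-occurrence-deduped words to their counts,
-- instead of A's accumulate-into-a-dict loop; objective: alternative decomposition (same cost).


-- ===== PORT A =====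
-- word[0] == letter : word[0] is the 1-character string at index 0 (words from split() are
-- nonempty, so the IndexError arm of pyGet? is unreachable and rendered as False)
def pvStartsWith (word : String) (letter : String) : Bool :=
  match PySem.Str.pyGet? word 0 with
  | some c => String.ofList [c] == letter
  | none => false

def count_words_starting_with_given_letter (text : String) (letter : String) : List (String × Int) :=
  ((PySem.Str.split₀ text).foldl
    (fun (result : PySem.Dict String Int) word =>
      if pvStartsWith word letter then
        if !(result.contains word) then result.insert word 1
        else result.insert word (result.getD word 0 + 1)
      else result)
    PySem.Dict.empty).items

-- ===== PORT B =====
def count_words_starting_with_given_letter_alt (text : String) (letter : String) : List (String × Int) :=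
  let ms := (PySem.Str.split₀ text).filter (fun w => pvStartsWith w letter)
  (PySem.List.dedup ms).map (fun w => (w, (ms.count w : Int)))

-- ===== PRECONDITION & SPEC =====
def Spec_count_words_starting_with_given_letter (text : String) (letter : String) (out : List (String × Int)) : Prop := out = count_words_starting_with_given_letter_alt text letter
instance (text : String) (letter : String) (out : List (String × Int)) : Decidable (Spec_count_words_starting_with_given_letter text letter out) := by unfold Spec_count_words_starting_with_given_letter; infer_instance

-- ===== CLAIM (what is proved, stated in full; the proofs are below) =====
def Claim_equal_count_words_starting_with_given_letter : Prop := ∀ (text : String) (letter : String), Dom_count_words_starting_with_given_letter text letter → Spec_count_words_starting_with_given_letter text letter (count_words_starting_with_given_letter text letter)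

-- ===== LEMMAS AND PROOFS =====

-- A's two branches are one and the same update: when the key is absent getD returns 0.
lemma pvStep_eq (d : PySem.Dict String Int) (w : String) :
    (if !(d.contains w) then d.insert w 1 else d.insert w (d.getD w 0 + 1))
      = d.insert w (d.getD w 0 + 1) := by
  by_cases h : d.contains w
  · simp [h]
  · have h0 : d.getD w 0 = 0 := PySem.Dict.getD_of_not_contains d 0 (by simpa using h)
    simp [h, h0]

-- ===== VERDICT (by name: the statement is the Claim_ definition above) =====
theorem count_words_starting_with_given_letter_spec : Claim_equal_count_words_starting_with_given_letter := by
  intro text letter _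
  unfold Spec_count_words_starting_with_given_letter
  unfold count_words_starting_with_given_letter count_words_starting_with_given_letter_alt
  rw [← List.foldl_filter (p := fun w => pvStartsWith w letter)]
  have hstep : (fun (d : PySem.Dict String Int) w =>
      if !(d.contains w) then d.insert w 1 else d.insert w (d.getD w 0 + 1))
      = fun d w => d.insert w (d.getD w 0 + 1) := by
    funext d w; exact pvStep_eq d w
  simp only [hstep, PySem.Dict.foldl_insert_getD_add_one_eq_counter,
    PySem.Dict.items_counter, PySem.List.dedup_eq_ofList]
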